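-- pv_equiv track=rewrite | github.com/HaJunYoo/algorithm-study | two_pointer/17609.py | check_palindrome_status
-- ===== SOURCE A (Python) =====
-- def is_palindrome(s, left, right):
--     while left < right:
--         if s[left] != s[right]:
--             return False
--         left += 1
--         right -= 1
--     return True
--
-- def check_palindrome_status(s):
--     left = 0
--     right = len(s) - 1
--
--     while left < right:
--         if s[left] != s[right]:
--             # s_left = s[left]
--             # s_right = s[right]
--             # 한 글자 제거해서 회문이 될 수 있는가?
--             if is_palindrome(s, left + 1, right) or is_palindrome(s, left, right - 1):
--                 return 1  # 유사회문
--             else: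
--                 return 2  # 일반 문자열
--         left += 1
--         right -= 1
--
--     return 0  # 회문
-- ===== SOURCE B (Python) =====
-- def check_palindrome_status(s):
--     r = s[::-1]
--     if s == r:
--         return 0
--     i = next(k for k in range(len(s)) if s[k] != r[k])
--     j = len(s) - 1 - i
--     if s[i + 1:j + 1] == s[i + 1:j + 1][::-1] or s[i:j] == s[i:j][::-1]:
--         return 1
--     return 2
-- ===== Notes on version B (the rewrite author's own statement) =====
-- stated objective: idiomatic
-- what changed: Replaces the converging two-pointer scans (outer while loop and index-based is_palindrome helper) by whole-string reversal: compare s with s[::-1], locate the first index where they differ, and test the two candidate deletion slices by slice == reversed-slice.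
import Mathlib
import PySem

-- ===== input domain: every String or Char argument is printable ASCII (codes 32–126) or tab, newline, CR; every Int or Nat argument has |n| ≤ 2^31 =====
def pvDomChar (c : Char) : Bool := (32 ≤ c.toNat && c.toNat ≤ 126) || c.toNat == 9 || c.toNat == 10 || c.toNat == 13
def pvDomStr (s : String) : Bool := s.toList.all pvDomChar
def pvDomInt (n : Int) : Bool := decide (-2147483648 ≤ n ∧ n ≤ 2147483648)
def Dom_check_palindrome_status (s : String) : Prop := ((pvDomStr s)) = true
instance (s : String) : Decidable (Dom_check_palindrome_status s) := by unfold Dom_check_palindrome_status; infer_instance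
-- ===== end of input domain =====

-- B replaces the converging two-pointer scan by whole-list reversal: it compares s with its
-- reverse, takes the first index where they differ, and tests the two candidate slices for
-- palindromicity by slice-vs-reversed-slice comparison (objective: idiomatic; return value only).

-- ===== PORT A =====
-- is_palindrome(s, left, right): two-pointer scan; the unreachable out-of-range branch returns false
def pvIsPalA (l : List Char) (left right : Int) : Bool :=
  if left < right then
    match PySem.List.pyGet? l left, PySem.List.pyGet? l right with
    | some a, some b => if a != b then false else pvIsPalA l (left + 1) (right - 1)
    | _, _ => false
  else true
termination_by (right - left).toNat
decreasing_by omega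

-- the main while-loop of check_palindrome_status; the unreachable out-of-range branch returns 0
def pvCheckA (l : List Char) (left right : Int) : Int :=
  if left < right then
    match PySem.List.pyGet? l left, PySem.List.pyGet? l right with
    | some a, some b =>
      if a != b then
        if pvIsPalA l (left + 1) right || pvIsPalA l left (right - 1) then 1 else 2
      else pvCheckA l (left + 1) (right - 1)
    | _, _ => 0
  else 0
termination_by (right - left).toNat
decreasing_by omega

def check_palindrome_status (s : String) : Int :=
  pvCheckA s.toList 0 ((s.toList.length : Int) - 1)

-- ===== PORT B =====
-- next(k for k in range(len(s)) if s[k] != r[k]): index of the first mismatch of two lists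
def pvFirstMismatch : List Char → List Char → Nat
  | x :: xs, y :: ys => if x != y then 0 else pvFirstMismatch xs ys + 1
  | _, _ => 0

def pvAltCore (l : List Char) : Int :=
  let r := l.reverse
  if l = r then 0
  else
    let i : Nat := pvFirstMismatch l r
    let j : Int := (l.length : Int) - 1 - (i : Int)
    let s1 := PySem.List.slice l (some ((i : Int) + 1)) (some (j + 1))
    let s2 := PySem.List.slice l (some (i : Int)) (some j)
    if s1 = s1.reverse ∨ s2 = s2.reverse then 1 else 2

def check_palindrome_status_alt (s : String) : Int :=
  pvAltCore s.toList

-- ===== PRECONDITION & SPEC =====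
def Spec_check_palindrome_status (s : String) (out : Int) : Prop := out = check_palindrome_status_alt s
instance (s : String) (out : Int) : Decidable (Spec_check_palindrome_status s out) := by unfold Spec_check_palindrome_status; infer_instance

-- ===== CLAIM (what is proved, stated in full; the proofs are below) =====
def Claim_equal_check_palindrome_status : Prop := ∀ (s : String), Dom_check_palindrome_status s → Spec_check_palindrome_status s (check_palindrome_status s)

-- ===== LEMMAS AND PROOFS =====

-- pointwise palindromicity of the range [a, b] of l
def PalRange (l : List Char) (a b : Nat) : Prop :=
  ∀ k : Nat, a ≤ k → k ≤ b → l[k]? = l[a + b - k]?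

theorem pal_iff_pointwise (t : List Char) :
    t = t.reverse ↔ ∀ k : Nat, k < t.length → t[k]? = t[t.length - 1 - k]? := by
  constructor
  · intro h k hk
    conv_lhs => rw [h]
    rw [List.getElem?_reverse hk]
  · intro h
    apply List.ext_getElem?
    intro k
    by_cases hk : k < t.length
    · rw [List.getElem?_reverse hk]
      exact h k hk
    · rw [List.getElem?_eq_none (by omega), List.getElem?_eq_none (by simp; omega)]

theorem isPalA_iff (l : List Char) :
    ∀ d a b : Nat, b - a = d → b < l.length →
      (pvIsPalA l (a : Int) (b : Int) = true ↔ PalRange l a b) := by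
  intro d
  induction d using Nat.strong_induction_on with
  | _ d ih =>
    intro a b hd hb
    rw [pvIsPalA]
    by_cases hab : a < b
    · have hx : l[a]? = some l[a] := List.getElem?_eq_getElem (by omega)
      have hy : l[b]? = some l[b] := List.getElem?_eq_getElem hb
      have h1 : PySem.List.pyGet? l (a : Int) = some l[a] := by
        rw [PySem.List.pyGet?_natCast]; exact hx
      have h2 : PySem.List.pyGet? l (b : Int) = some l[b] := by
        rw [PySem.List.pyGet?_natCast]; exact hy
      rw [if_pos (by exact_mod_cast hab), h1, h2]
      have hc1 : ((a : Int) + 1) = ((a + 1 : Nat) : Int) := by push_cast; ring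
      have hc2 : ((b : Int) - 1) = ((b - 1 : Nat) : Int) := by omega
      by_cases hne : l[a] = l[b]
      · simp only [hne, bne_self_eq_false, Bool.false_eq_true, if_false]
        rw [hc1, hc2, ih (b - 1 - (a + 1)) (by omega) (a + 1) (b - 1) rfl (by omega)]
        constructor
        · intro hp k hk1 hk2
          by_cases hka : k = a
          · rw [hka]
            have e : a + b - a = b := by omega
            rw [e, hx, hy, hne]
          · by_cases hkb : k = b
            · rw [hkb]
              have e : a + b - b = a := by omega
              rw [e, hx, hy, hne]
            · have := hp k (by omega) (by omega)
              have he : a + 1 + (b - 1) - k = a + b - k := by omega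
              rwa [he] at this
        · intro hp k hk1 hk2
          have he : a + 1 + (b - 1) = a + b := by omega
          rw [he]
          exact hp k (by omega) (by omega)
      · simp only [bne_iff_ne, ne_eq, hne, not_false_iff, if_true]
        constructor
        · intro h; exact absurd h (by simp)
        · intro hp
          have := hp a (le_refl a) (by omega)
          have he : a + b - a = b := by omega
          rw [he, hx, hy] at this
          exact absurd (Option.some.inj this) hne
    · rw [if_neg (by exact_mod_cast hab)]
      constructor
      · intro _ k hk1 hk2
        have : k = a ∧ a = b := by omega
        obtain ⟨h1, h2⟩ := this
        subst h1; subst h2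
        congr 1; omega
      · intro _; rfl

-- palindromicity of the slice l[a : b+1] is PalRange l a b
theorem slice_pal_iff (l : List Char) (a b : Nat) (hb : b < l.length) (hab : a ≤ b + 1) :
    ((l.drop a).take (b + 1 - a) = ((l.drop a).take (b + 1 - a)).reverse ↔ PalRange l a b) := by
  set t := (l.drop a).take (b + 1 - a) with ht
  have hlen : t.length = b + 1 - a := by
    rw [ht]; simp; omega
  rw [pal_iff_pointwise]
  have hget : ∀ k : Nat, k < b + 1 - a → t[k]? = l[a + k]? := by
    intro k hk
    rw [ht]
    rw [List.getElem?_take_of_lt hk, List.getElem?_drop]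
  constructor
  · intro h k hk1 hk2
    have h1 := h (k - a) (by omega)
    rw [hlen] at h1
    rw [hget (k - a) (by omega), hget (b + 1 - a - 1 - (k - a)) (by omega)] at h1
    have e1 : a + (k - a) = k := by omega
    have e2 : a + (b + 1 - a - 1 - (k - a)) = a + b - k := by omega
    rwa [e1, e2] at h1
  · intro h k hk
    rw [hlen] at hk
    rw [hget k hk, hget (t.length - 1 - k) (by omega)]
    have h1 := h (a + k) (by omega) (by omega)
    have e2 : a + b - (a + k) = a + (t.length - 1 - k) := by rw [hlen]; omega
    rwa [e2] at h1

theorem firstMismatch_eq (a b : List Char) :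
    ∀ k : Nat, k < a.length → a[k]? ≠ b[k]? → (∀ j : Nat, j < k → a[j]? = b[j]?) →
      pvFirstMismatch a b = k := by
  induction a generalizing b with
  | nil => intro k hk; simp at hk
  | cons x xs ih =>
    intro k hk hdiff hpre
    cases b with
    | nil =>
      cases k with
      | zero => simp [pvFirstMismatch]
      | succ m =>
        have := hpre 0 (by omega)
        simp at this
    | cons y ys =>
      cases k with
      | zero =>
        have hxy : x ≠ y := by simpa using hdiff
        simp [pvFirstMismatch, hxy]
      | succ m =>
        have hxy : x = y := by have := hpre 0 (by omega); simpa using this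
        rw [pvFirstMismatch]
        rw [if_neg (by simp [hxy])]
        have := ih ys m (by simpa using hk) (by simpa using hdiff)
          (fun j hj => by have := hpre (j + 1) (by omega); simpa using this)
        omega

theorem checkA_loop (l : List Char) :
    ∀ d left right : Nat, right - left = d →
      left + right = l.length - 1 → right < l.length →
      (∀ j : Nat, j < left → l[j]? = l[l.length - 1 - j]?) →
      pvCheckA l (left : Int) (right : Int) = pvAltCore l := by
  intro d
  induction d using Nat.strong_induction_on with
  | _ d ih =>
    intro left right hd hsum hr hinv
    by_cases hlr : left < right
    · have hx : l[left]? = some l[left] := List.getElem?_eq_getElem (by omega)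
      have hy : l[right]? = some l[right] := List.getElem?_eq_getElem hr
      have h1 : PySem.List.pyGet? l (left : Int) = some l[left] := by
        rw [PySem.List.pyGet?_natCast]; exact hx
      have h2 : PySem.List.pyGet? l (right : Int) = some l[right] := by
        rw [PySem.List.pyGet?_natCast]; exact hy
      have hc1 : ((left : Int) + 1) = ((left + 1 : Nat) : Int) := by push_cast; ring
      have hc2 : ((right : Int) - 1) = ((right - 1 : Nat) : Int) := by omega
      have hrl : l.length - 1 - left = right := by omega
      rw [pvCheckA, if_pos (by exact_mod_cast hlr), h1, h2]
      by_cases hne : l[left] = l[right]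
      · simp only [hne, bne_self_eq_false, Bool.false_eq_true, if_false]
        rw [hc1, hc2]
        apply ih (right - 1 - (left + 1)) (by omega) (left + 1) (right - 1) rfl (by omega) (by omega)
        intro j hj
        by_cases hjl : j < left
        · exact hinv j hjl
        · have hj' : j = left := by omega
          rw [hj', hrl, hx, hy, hne]
      · simp only [bne_iff_ne, ne_eq, hne, not_false_iff, if_true]
        have hne' : l ≠ l.reverse := by
          intro h
          rw [pal_iff_pointwise] at h
          have := h left (by omega)
          rw [hrl, hx, hy] at this
          exact hne (Option.some.inj this)
        have hfm : pvFirstMismatch l l.reverse = left := by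
          apply firstMismatch_eq l l.reverse left (by omega)
          · rw [List.getElem?_reverse (by omega), hrl, hx, hy]
            intro hcon; exact hne (Option.some.inj hcon)
          · intro j hj
            rw [List.getElem?_reverse (by omega)]
            exact hinv j hj
        rw [pvAltCore]
        simp only [if_neg hne', hfm]
        have hj : (l.length : Int) - 1 - (left : Nat) = ((right : Nat) : Int) := by omega
        rw [hj]
        have hc3 : ((right : Int) + 1) = ((right + 1 : Nat) : Int) := by push_cast; ring
        rw [hc1, hc2, hc3, PySem.List.slice_natCast, PySem.List.slice_natCast]
        have hA1 := isPalA_iff l (right - (left + 1)) (left + 1) right rfl hr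
        have hA2 := isPalA_iff l ((right - 1) - left) left (right - 1) rfl (by omega)
        have hS1 := slice_pal_iff l (left + 1) right hr (by omega)
        have hS2 := slice_pal_iff l left (right - 1) (by omega) (by omega)
        have e1 : right + 1 - (left + 1) = right - left := by omega
        have e2 : right - 1 + 1 - left = right - left := by omega
        rw [e1] at hS1 ⊢
        rw [e2] at hS2
        have hb : (pvIsPalA l ((left + 1 : Nat) : Int) ((right : Nat) : Int) ||
            pvIsPalA l ((left : Nat) : Int) ((right - 1 : Nat) : Int)) = true ↔
            (PalRange l (left + 1) right ∨ PalRange l left (right - 1)) := by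
          rw [Bool.or_eq_true, hA1, hA2]
        by_cases hp : PalRange l (left + 1) right ∨ PalRange l left (right - 1)
        · rw [if_pos (hb.mpr hp), if_pos (by
            rcases hp with h | h
            · exact Or.inl (hS1.mpr h)
            · exact Or.inr (hS2.mpr h))]
        · rw [if_neg (fun hc => hp (hb.mp hc)), if_neg (fun hc => hp (by
            rcases hc with h | h
            · exact Or.inl (hS1.mp h)
            · exact Or.inr (hS2.mp h)))]
    · rw [pvCheckA, if_neg (by exact_mod_cast hlr)]
      have hpal : l = l.reverse := by
        rw [pal_iff_pointwise]
        intro k hk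
        by_cases h1 : k < left
        · exact hinv k h1
        · by_cases h2 : l.length - 1 - k < left
          · have := hinv (l.length - 1 - k) h2
            have e : l.length - 1 - (l.length - 1 - k) = k := by omega
            rw [e] at this
            exact this.symm
          · have e : k = l.length - 1 - k := by omega
            rw [← e]
      simp [pvAltCore, ← hpal]

-- ===== VERDICT (by name: the statement is the Claim_ definition above) =====
theorem check_palindrome_status_spec : Claim_equal_check_palindrome_status := by
  intro s _
  unfold Spec_check_palindrome_status check_palindrome_status check_palindrome_status_alt
  cases hn : s.toList.length with
  | zero =>
    have hl : s.toList = [] := List.eq_nil_of_length_eq_zero hn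
    rw [hl]
    rw [pvCheckA]
    simp [pvAltCore]
  | succ m =>
    have hc : ((m + 1 : Nat) : Int) - 1 = ((m : Nat) : Int) := by push_cast; ring
    rw [hc]
    exact checkA_loop s.toList m 0 m rfl (by omega) (by omega) (by intro j hj; omega)
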